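-- pv_equiv track=rewrite | github.com/r3dBust3r/1337-42CodingSchool | 06_Python_Modules/Python_Module_03/ex5/ft_data_stream.py | game_event_stream
-- ===== SOURCE A (Python) =====
-- def event_type(i):
--     """Event type generator"""
--     if (i % 4 == 2):
--         return "killed monster"
--     if (i % 5 == 1):
--         return "leveled up"
--     return "found treasure"
--
-- def player_name(i):
--     """Player name generator"""
--     if (i % 3 == 0):
--         return "alice"
--     if (i % 4 == 0):
--         return "bob"
--     return "charlie"
--
-- def player_level(i):
--     """Level generator"""
--     return (i % 15) + 1
--
-- def game_event_stream(count):
--     """Game event stream: streams events one at a time"""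
--     for i in range(1, count + 1):
--         name = player_name(i)
--         level = player_level(i)
--         action = event_type(i)
--         yield (
--             f"Event {i}: Player {name} "
--             f"(level {level}) {action}"
--         )
-- ===== SOURCE B (Python) =====
-- def _rules(i):
--     name = "alice" if i % 3 == 0 else ("bob" if i % 4 == 0 else "charlie")
--     level = (i % 15) + 1
--     action = ("killed monster" if i % 4 == 2
--               else ("leveled up" if i % 5 == 1 else "found treasure"))
--     return (name, level, action)
--
--
-- _EVENTS = [_rules(j) for j in range(1, 61)]
--
--
-- def game_event_stream(count):
--     """Game event stream driven by a precomputed period-60 lookup table"""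
--     for i in range(1, count + 1):
--         name, level, action = _EVENTS[(i - 1) % 60]
--         yield (
--             f"Event {i}: Player {name} "
--             f"(level {level}) {action}"
--         )
-- ===== Notes on version B (the rewrite author's own statement) =====
-- stated objective: alternative
-- what changed: B precomputes a fixed 60-entry lookup table of (name, level, action) tuples (the rules depend only on i mod 3/4/5/15, hence repeat with period 60) and the stream reads events[(i-1) % 60] instead of re-evaluating the three if-chains per event.
import Mathlib
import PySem

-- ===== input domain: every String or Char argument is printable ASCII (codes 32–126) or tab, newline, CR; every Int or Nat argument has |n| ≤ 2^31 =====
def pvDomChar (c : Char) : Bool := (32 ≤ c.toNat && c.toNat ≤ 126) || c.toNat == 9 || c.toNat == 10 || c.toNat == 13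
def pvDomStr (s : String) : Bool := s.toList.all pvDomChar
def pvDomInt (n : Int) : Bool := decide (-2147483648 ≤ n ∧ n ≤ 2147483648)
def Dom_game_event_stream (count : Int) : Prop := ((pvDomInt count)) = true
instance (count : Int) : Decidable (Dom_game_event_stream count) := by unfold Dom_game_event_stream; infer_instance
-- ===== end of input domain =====

-- B replaces per-event branch evaluation by a precomputed period-60 lookup table
-- (the rules depend only on i mod 3/4/5/15, so they repeat with period 60): alternative decomposition, same cost.
-- A is a Python generator; both ports return the full list of yielded strings.


-- ===== PORT A =====
def event_type (i : Int) : String :=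
  if PySem.Int.mod i 4 = 2 then "killed monster"
  else if PySem.Int.mod i 5 = 1 then "leveled up"
  else "found treasure"

def player_name (i : Int) : String :=
  if PySem.Int.mod i 3 = 0 then "alice"
  else if PySem.Int.mod i 4 = 0 then "bob"
  else "charlie"

def player_level (i : Int) : Int := PySem.Int.mod i 15 + 1

def game_event_stream (count : Int) : List String :=
  (PySem.List.pyRange 1 (count + 1) 1).map (fun i =>
    let name := player_name i
    let level := player_level i
    let action := event_type i
    "Event " ++ PySem.Int.toStr i ++ ": Player " ++ name ++
      " (level " ++ PySem.Int.toStr level ++ ") " ++ action)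

-- ===== PORT B =====
def pvRules (i : Int) : String × Int × String :=
  ((if PySem.Int.mod i 3 = 0 then "alice"
    else if PySem.Int.mod i 4 = 0 then "bob" else "charlie"),
   PySem.Int.mod i 15 + 1,
   (if PySem.Int.mod i 4 = 2 then "killed monster"
    else if PySem.Int.mod i 5 = 1 then "leveled up" else "found treasure"))

def pvEvents : List (String × Int × String) :=
  (PySem.List.pyRange 1 61 1).map pvRules

def game_event_stream_alt (count : Int) : List String :=
  (PySem.List.pyRange 1 (count + 1) 1).map (fun i =>
    let e := PySem.List.pyGetD pvEvents (PySem.Int.mod (i - 1) 60) (pvRules 1)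
    "Event " ++ PySem.Int.toStr i ++ ": Player " ++ e.1 ++
      " (level " ++ PySem.Int.toStr e.2.1 ++ ") " ++ e.2.2)

-- ===== PRECONDITION & SPEC =====
def Spec_game_event_stream (count : Int) (out : List String) : Prop := out = game_event_stream_alt count
instance (count : Int) (out : List String) : Decidable (Spec_game_event_stream count out) := by unfold Spec_game_event_stream; infer_instance

-- ===== CLAIM (what is proved, stated in full; the proofs are below) =====
def Claim_equal_game_event_stream : Prop := ∀ (count : Int), Dom_game_event_stream count → Spec_game_event_stream count (game_event_stream count)

-- ===== LEMMAS AND PROOFS =====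

-- the table lookup at (i-1) % 60 yields exactly the tuple pvRules (1 + (i-1) % 60)
theorem pvEvents_lookup (i : Int) :
    PySem.List.pyGetD pvEvents (PySem.Int.mod (i - 1) 60) (pvRules 1)
      = pvRules (1 + PySem.Int.mod (i - 1) 60) := by
  have h0 : (0:Int) ≤ PySem.Int.mod (i - 1) 60 := PySem.Int.mod_nonneg _ (by norm_num)
  have h1 : PySem.Int.mod (i - 1) 60 < 60 := PySem.Int.mod_lt _ (by norm_num)
  unfold pvEvents
  rw [PySem.List.pyGetD_map]
  congr 1
  rw [PySem.List.pyGetD_eq_getElem _ _ h0 (by rw [PySem.List.length_pyRange_one]; omega)]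
  rw [PySem.List.getElem_pyRange_one]
  omega

-- the three rules are periodic with period 60
theorem pvRules_periodic (i : Int) :
    pvRules (1 + PySem.Int.mod (i - 1) 60) = (player_name i, player_level i, event_type i) := by
  have e3 : PySem.Int.mod (1 + PySem.Int.mod (i - 1) 60) 3 = PySem.Int.mod i 3 := by
    rw [PySem.Int.mod_eq_emod_of_pos (by norm_num), PySem.Int.mod_eq_emod_of_pos (by norm_num),
        PySem.Int.mod_eq_emod_of_pos (by norm_num)]; omega
  have e4 : PySem.Int.mod (1 + PySem.Int.mod (i - 1) 60) 4 = PySem.Int.mod i 4 := by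
    rw [PySem.Int.mod_eq_emod_of_pos (by norm_num), PySem.Int.mod_eq_emod_of_pos (by norm_num),
        PySem.Int.mod_eq_emod_of_pos (by norm_num)]; omega
  have e5 : PySem.Int.mod (1 + PySem.Int.mod (i - 1) 60) 5 = PySem.Int.mod i 5 := by
    rw [PySem.Int.mod_eq_emod_of_pos (by norm_num), PySem.Int.mod_eq_emod_of_pos (by norm_num),
        PySem.Int.mod_eq_emod_of_pos (by norm_num)]; omega
  have e15 : PySem.Int.mod (1 + PySem.Int.mod (i - 1) 60) 15 = PySem.Int.mod i 15 := by
    rw [PySem.Int.mod_eq_emod_of_pos (by norm_num), PySem.Int.mod_eq_emod_of_pos (by norm_num),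
        PySem.Int.mod_eq_emod_of_pos (by norm_num)]; omega
  unfold pvRules player_name player_level event_type
  rw [e3, e4, e5, e15]

-- ===== VERDICT (by name: the statement is the Claim_ definition above) =====
theorem game_event_stream_spec : Claim_equal_game_event_stream := by
  intro count _
  unfold Spec_game_event_stream game_event_stream game_event_stream_alt
  refine List.map_congr_left (fun i _ => ?_)
  rw [pvEvents_lookup i, pvRules_periodic i]
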